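-- pv_equiv track=rewrite | github.com/Bricesodini/Vocalie-TTS | app.py | format_adjustment_log
-- ===== SOURCE A (Python) =====
-- def format_adjustment_log(changes: list[str], enabled: bool) -> str:
--     if not enabled:
--         return ""
--     if not changes:
--         return "Aucune correction."
--     ordered: list[str] = []
--     ordered.extend([c for c in changes if c.startswith("paste_norm_applied:")])
--     ordered.extend([c for c in changes if c.startswith("paste_norm_counts:")])
--     ordered.extend([c for c in changes if c.startswith("sigle_undot:")])
--     ordered.extend([c for c in changes if c.startswith("lexicon_hit:")])
--     ordered.extend([c for c in changes if c.startswith("sigle_auto:")])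
--     lines = "\n".join(f"- {entry}" for entry in ordered)
--     return f"**Corrections appliquées**\n{lines}"
-- ===== SOURCE B (Python) =====
-- PREFIXES = (
--     "paste_norm_applied:",
--     "paste_norm_counts:",
--     "sigle_undot:",
--     "lexicon_hit:",
--     "sigle_auto:",
-- )
--
-- def format_adjustment_log(changes: list[str], enabled: bool) -> str:
--     if not enabled:
--         return ""
--     if not changes:
--         return "Aucune correction."
--     buckets = {p: [] for p in PREFIXES}
--     for c in changes:
--         for p in PREFIXES:
--             if c.startswith(p):
--                 buckets[p].append(c)
--     lines = "\n".join("- " + e for p in PREFIXES for e in buckets[p])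
--     return "**Corrections appliquées**\n" + lines
-- ===== Notes on version B (the rewrite author's own statement) =====
-- stated objective: alternative
-- what changed: Replaces A's five separate filter passes over `changes` with a single pass that dispatches each entry into per-prefix buckets, then concatenates the buckets in priority order.
import Mathlib
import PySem

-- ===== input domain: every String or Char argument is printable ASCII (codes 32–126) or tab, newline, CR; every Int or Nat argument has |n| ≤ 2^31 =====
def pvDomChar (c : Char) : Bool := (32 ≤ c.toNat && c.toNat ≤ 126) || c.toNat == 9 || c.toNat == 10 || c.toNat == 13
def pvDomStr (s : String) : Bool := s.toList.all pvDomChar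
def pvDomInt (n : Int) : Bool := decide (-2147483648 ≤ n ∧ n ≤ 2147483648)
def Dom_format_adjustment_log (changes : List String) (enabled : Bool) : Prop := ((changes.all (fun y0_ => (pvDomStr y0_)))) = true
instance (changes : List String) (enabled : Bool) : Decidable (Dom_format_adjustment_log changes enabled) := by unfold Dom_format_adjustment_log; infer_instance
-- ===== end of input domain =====

-- B replaces A's five filter passes over `changes` with a single pass into per-prefix buckets
-- concatenated in priority order (objective: alternative decomposition, same result).

-- ===== PORT A =====
def format_adjustment_log (changes : List String) (enabled : Bool) : String :=
  if !enabled then ""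
  else if changes = [] then "Aucune correction."
  else
    let ordered : List String := []
    let ordered := ordered ++ changes.filter (fun c => PySem.Str.startswith c "paste_norm_applied:")
    let ordered := ordered ++ changes.filter (fun c => PySem.Str.startswith c "paste_norm_counts:")
    let ordered := ordered ++ changes.filter (fun c => PySem.Str.startswith c "sigle_undot:")
    let ordered := ordered ++ changes.filter (fun c => PySem.Str.startswith c "lexicon_hit:")
    let ordered := ordered ++ changes.filter (fun c => PySem.Str.startswith c "sigle_auto:")
    let lines := PySem.Str.join "\n" (ordered.map (fun entry => "- " ++ entry))
    "**Corrections appliquées**\n" ++ lines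

-- ===== PORT B =====
-- one step of B's single pass: append c to every bucket whose prefix matches
def pvBStep (acc : List String × List String × List String × List String × List String)
    (c : String) : List String × List String × List String × List String × List String :=
  let (b1, b2, b3, b4, b5) := acc
  (if PySem.Str.startswith c "paste_norm_applied:" then b1 ++ [c] else b1,
   if PySem.Str.startswith c "paste_norm_counts:" then b2 ++ [c] else b2,
   if PySem.Str.startswith c "sigle_undot:" then b3 ++ [c] else b3,
   if PySem.Str.startswith c "lexicon_hit:" then b4 ++ [c] else b4,
   if PySem.Str.startswith c "sigle_auto:" then b5 ++ [c] else b5)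

def format_adjustment_log_alt (changes : List String) (enabled : Bool) : String :=
  if !enabled then ""
  else if changes = [] then "Aucune correction."
  else
    let (b1, b2, b3, b4, b5) := changes.foldl pvBStep ([], [], [], [], [])
    let lines := PySem.Str.join "\n" ((b1 ++ b2 ++ b3 ++ b4 ++ b5).map (fun e => "- " ++ e))
    "**Corrections appliquées**\n" ++ lines

-- ===== PRECONDITION & SPEC =====
def Spec_format_adjustment_log (changes : List String) (enabled : Bool) (out : String) : Prop := out = format_adjustment_log_alt changes enabled
instance (changes : List String) (enabled : Bool) (out : String) : Decidable (Spec_format_adjustment_log changes enabled out) := by unfold Spec_format_adjustment_log; infer_instance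

-- ===== CLAIM (what is proved, stated in full; the proofs are below) =====
def Claim_equal_format_adjustment_log : Prop := ∀ (changes : List String) (enabled : Bool), Dom_format_adjustment_log changes enabled → Spec_format_adjustment_log changes enabled (format_adjustment_log changes enabled)

-- ===== LEMMAS AND PROOFS =====

-- B's single pass computes exactly A's five filters
theorem pvBStep_foldl (cs : List String)
    (b1 b2 b3 b4 b5 : List String) :
    cs.foldl pvBStep (b1, b2, b3, b4, b5) =
      (b1 ++ cs.filter (fun c => PySem.Str.startswith c "paste_norm_applied:"),
       b2 ++ cs.filter (fun c => PySem.Str.startswith c "paste_norm_counts:"),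
       b3 ++ cs.filter (fun c => PySem.Str.startswith c "sigle_undot:"),
       b4 ++ cs.filter (fun c => PySem.Str.startswith c "lexicon_hit:"),
       b5 ++ cs.filter (fun c => PySem.Str.startswith c "sigle_auto:")) := by
  induction cs generalizing b1 b2 b3 b4 b5 with
  | nil => simp
  | cons c cs ih =>
    simp only [List.foldl_cons, pvBStep, List.filter_cons]
    rw [ih]
    split_ifs <;> simp

-- ===== VERDICT (by name: the statement is the Claim_ definition above) =====
theorem format_adjustment_log_spec : Claim_equal_format_adjustment_log := by
  intro changes enabled _
  unfold Spec_format_adjustment_log format_adjustment_log format_adjustment_log_alt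
  cases enabled with
  | false => simp
  | true =>
    by_cases h : changes = []
    · simp [h]
    · simp only [h, Bool.not_true, Bool.false_eq_true, if_false, pvBStep_foldl,
        List.nil_append]
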